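-- pv_equiv track=rewrite | github.com/pypi-data/pypi-mirror-73 | packages/kyanitapi/kyanitapi-1.0.1-py3-none-any.whl/kyanitapi/__init__.py | cid_is_valid
-- ===== SOURCE A (Python) =====
-- VALID_ID_COLORS = ["B", "C", "G", "M", "R", "W", "Y"]
--
-- def cid_is_valid(color_id):
--     """
--     Return `True` if `color_id` is a valid Color ID string, and `False` otherwise.
--
--     'BBB' (an address of 0) is not considered to be valid, and neither is any ID
--     representing an address above 254.
--     """
--
--     if not isinstance(color_id, str):
--         return False
--     if len(color_id) != 3:
--         return False
--     color_id = color_id.upper()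
--     for symbol in color_id:
--         if symbol not in VALID_ID_COLORS:
--             return False
--     # Color ID must result in an IP octet between 1 and 254
--     num = 0
--     for symbol in enumerate(color_id[::-1]):
--         num += len(VALID_ID_COLORS) ** symbol[0] * VALID_ID_COLORS.index(symbol[1])
--     if num < 1 or num > 254:
--         return False
--     return True
-- ===== SOURCE B (Python) =====
-- VALID_ID_COLORS = ["B", "C", "G", "M", "R", "W", "Y"]
--
--
-- def _all_valid_ids():
--     # enumerate the 254 valid addresses once and render each as its Color ID
--     ids = set()
--     for n in range(1, 255):
--         ids.add(VALID_ID_COLORS[n // 49]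
--                 + VALID_ID_COLORS[n // 7 % 7]
--                 + VALID_ID_COLORS[n % 7])
--     return ids
--
--
-- _VALID_IDS = _all_valid_ids()
--
--
-- def cid_is_valid(color_id):
--     return isinstance(color_id, str) and color_id.upper() in _VALID_IDS
-- ===== Notes on version B (the rewrite author's own statement) =====
-- stated objective: alternative
-- what changed: B precomputes once the set of all 254 valid Color ID strings (rendering each address 1..254 in base 7 over the color alphabet) and decides validity by a single membership test of the uppercased input, replacing A's per-input character-validation loop, reversed-enumerate powers-of-7 accumulation and range check.
import Mathlib
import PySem

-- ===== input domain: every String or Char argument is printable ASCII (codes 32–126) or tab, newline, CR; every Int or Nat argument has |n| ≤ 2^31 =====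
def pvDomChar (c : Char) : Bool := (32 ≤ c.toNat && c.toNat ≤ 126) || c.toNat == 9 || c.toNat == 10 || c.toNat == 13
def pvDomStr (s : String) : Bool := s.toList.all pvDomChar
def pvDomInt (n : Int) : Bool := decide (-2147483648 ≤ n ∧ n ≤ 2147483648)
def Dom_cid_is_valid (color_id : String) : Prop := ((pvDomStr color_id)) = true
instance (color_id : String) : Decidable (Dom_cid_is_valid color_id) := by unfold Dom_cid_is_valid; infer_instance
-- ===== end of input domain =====

-- B precomputes the set of the 254 valid Color IDs once (one string per address 1..254) and answers by a membership test of the uppercased input, replacing A's per-input validation loop and base-7 accumulation.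

-- ===== PORT A =====
def VALID_ID_COLORS : List Char := ['B', 'C', 'G', 'M', 'R', 'W', 'Y']

-- body of A after the length guard, on the uppercased characters
def cid_body (up : List Char) : Bool :=
  -- for symbol in color_id: if symbol not in VALID_ID_COLORS: return False
  if up.any (fun symbol => !(VALID_ID_COLORS.contains symbol)) then false
  else
    -- color_id[::-1]: slice? with step -1 is always some (getD [] unreachable);
    -- the ** exponent is an enumerate index, hence ≥ 0, so ^ on .toNat is exact;
    -- .index() cannot raise after the membership guard, so .getD 0 is unreachable
    let rev := (PySem.List.slice? up none none (-1)).getD []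
    let num : Int := (PySem.List.enumerate rev).foldl
      (fun num p =>
        num + (VALID_ID_COLORS.length : Int) ^ p.1.toNat *
          (((PySem.List.index? VALID_ID_COLORS p.2).getD 0 : Nat) : Int)) 0
    if num < 1 ∨ num > 254 then false else true

def cid_is_valid (color_id : String) : Bool :=
  -- isinstance(color_id, str) is always true under the type convention
  if PySem.Str.len color_id ≠ 3 then false
  else cid_body (PySem.Str.upper color_id).toList

-- ===== PORT B =====
-- VALID_ID_COLORS[n//49] + VALID_ID_COLORS[n//7%7] + VALID_ID_COLORS[n%7]:
-- a list of 1-char strings concatenated = String.ofList of the three chars;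
-- the indices lie in [0,7) on range(1,255), so pyGet? never misses (getD 'B' unreachable)
def mkId (n : Int) : String :=
  String.ofList
    [(PySem.List.pyGet? VALID_ID_COLORS (PySem.Int.floordiv n 49)).getD 'B',
     (PySem.List.pyGet? VALID_ID_COLORS (PySem.Int.mod (PySem.Int.floordiv n 7) 7)).getD 'B',
     (PySem.List.pyGet? VALID_ID_COLORS (PySem.Int.mod n 7)).getD 'B']

-- _all_valid_ids(): ids = set(); for n in range(1, 255): ids.add(...)
def allValidIds : PySem.Set String :=
  (PySem.List.pyRange 1 255 1).foldl
    (fun ids n => PySem.Set.add ids (mkId n)) PySem.Set.empty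

def cid_is_valid_alt (color_id : String) : Bool :=
  -- isinstance(color_id, str) is always true under the type convention
  PySem.Set.contains allValidIds (PySem.Str.upper color_id)

-- ===== PRECONDITION & SPEC =====
def Spec_cid_is_valid (color_id : String) (out : Bool) : Prop := out = cid_is_valid_alt color_id
instance (color_id : String) (out : Bool) : Decidable (Spec_cid_is_valid color_id out) := by unfold Spec_cid_is_valid; infer_instance

-- ===== CLAIM (what is proved, stated in full; the proofs are below) =====
def Claim_equal_cid_is_valid : Prop := ∀ (color_id : String), Dom_cid_is_valid color_id → Spec_cid_is_valid color_id (cid_is_valid color_id)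

-- ===== LEMMAS AND PROOFS =====

-- the base-7 digit of a valid color character (proof-side helper)
def idx (a : Char) : Int := (((PySem.List.index? VALID_ID_COLORS a).getD 0 : Nat) : Int)

lemma idx_char (a : Char) (ha : a ∈ VALID_ID_COLORS) :
    (PySem.List.pyGet? VALID_ID_COLORS (idx a)).getD 'B' = a ∧ 0 ≤ idx a ∧ idx a < 7 := by
  fin_cases ha <;> exact ⟨by decide, by decide, by decide⟩

lemma getD_mem (i : Int) : (PySem.List.pyGet? VALID_ID_COLORS i).getD 'B' ∈ VALID_ID_COLORS := by
  cases h : PySem.List.pyGet? VALID_ID_COLORS i with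
  | none => decide
  | some v =>
    simp only [Option.getD_some]
    simp only [PySem.List.pyGet?] at h
    obtain ⟨k, -, hk⟩ := Option.bind_eq_some_iff.mp h
    exact List.mem_of_getElem? hk

lemma dig_inj (i j : Int) (hi0 : 0 ≤ i) (hi : i < 7) (hj0 : 0 ≤ j) (hj : j < 7)
    (h : (PySem.List.pyGet? VALID_ID_COLORS i).getD 'B' =
         (PySem.List.pyGet? VALID_ID_COLORS j).getD 'B') : i = j := by
  interval_cases i <;> interval_cases j <;> first | rfl | exact absurd h (by decide)

lemma mkId_val (a b c : Char) (ha : a ∈ VALID_ID_COLORS) (hb : b ∈ VALID_ID_COLORS)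
    (hc : c ∈ VALID_ID_COLORS) :
    mkId (49 * idx a + 7 * idx b + idx c) = String.ofList [a, b, c] := by
  obtain ⟨ea, ha0, ha7⟩ := idx_char a ha
  obtain ⟨eb, hb0, hb7⟩ := idx_char b hb
  obtain ⟨ec, hc0, hc7⟩ := idx_char c hc
  have h49 : PySem.Int.floordiv (49 * idx a + 7 * idx b + idx c) 49 = idx a := by
    rw [PySem.Int.floordiv_eq_ediv_of_pos (by norm_num)]; omega
  have h7 : PySem.Int.floordiv (49 * idx a + 7 * idx b + idx c) 7 = 7 * idx a + idx b := by
    rw [PySem.Int.floordiv_eq_ediv_of_pos (by norm_num)]; omega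
  have hm7 : PySem.Int.mod (7 * idx a + idx b) 7 = idx b := by
    rw [PySem.Int.mod_eq_emod_of_pos (by norm_num)]; omega
  have hmv : PySem.Int.mod (49 * idx a + 7 * idx b + idx c) 7 = idx c := by
    rw [PySem.Int.mod_eq_emod_of_pos (by norm_num)]; omega
  unfold mkId
  rw [h49, h7, hm7, hmv, ea, eb, ec]

lemma mkId_inj (n m : Int) (hn0 : 0 ≤ n) (hn : n < 343) (hm0 : 0 ≤ m) (hm : m < 343)
    (h : mkId n = mkId m) : n = m := by
  have h' := congrArg String.toList h
  simp only [mkId, String.toList_ofList, List.cons.injEq, and_true] at h'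
  obtain ⟨h1, h2, h3⟩ := h'
  simp only [PySem.Int.floordiv_eq_ediv_of_pos (by norm_num : (0:Int) < 49),
    PySem.Int.floordiv_eq_ediv_of_pos (by norm_num : (0:Int) < 7),
    PySem.Int.mod_eq_emod_of_pos (by norm_num : (0:Int) < 7)] at h1 h2 h3
  have e1 := dig_inj _ _ (by omega) (by omega) (by omega) (by omega) h1
  have e2 := dig_inj _ _ (by omega) (by omega) (by omega) (by omega) h2
  have e3 := dig_inj _ _ (by omega) (by omega) (by omega) (by omega) h3
  omega

set_option maxRecDepth 10000 in
lemma mem_allValidIds (x : String) :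
    x ∈ allValidIds ↔ ∃ n : Int, (1 ≤ n ∧ n < 255) ∧ mkId n = x := by
  have hfold : allValidIds = PySem.Set.ofList ((PySem.List.pyRange 1 255 1).map mkId) := by
    unfold allValidIds PySem.Set.ofList
    exact List.foldl_map.symm
  rw [hfold, PySem.Set.mem_ofList, List.mem_map]
  constructor
  · rintro ⟨n, hn, rfl⟩
    exact ⟨n, PySem.List.mem_pyRange_one.mp hn, rfl⟩
  · rintro ⟨n, hn, rfl⟩
    exact ⟨n, PySem.List.mem_pyRange_one.mpr hn, rfl⟩

-- Set.contains on an UNEVALUATED set: instantiated with s a variable so no defeq unfolding of allValidIds is ever needed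
lemma set_contains_iff_mem (s : PySem.Set String) (x : String) :
    PySem.Set.contains s x = true ↔ x ∈ s := List.contains_iff_mem

lemma contains_iff (x : String) :
    PySem.Set.contains allValidIds x = true ↔ ∃ n : Int, (1 ≤ n ∧ n < 255) ∧ mkId n = x :=
  (set_contains_iff_mem allValidIds x).trans (mem_allValidIds x)

lemma core_valid (a b c : Char) (ha : a ∈ VALID_ID_COLORS) (hb : b ∈ VALID_ID_COLORS)
    (hc : c ∈ VALID_ID_COLORS) :
    PySem.Set.contains allValidIds (String.ofList [a, b, c]) =
      decide (1 ≤ 49 * idx a + 7 * idx b + idx c ∧ 49 * idx a + 7 * idx b + idx c ≤ 254) := by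
  obtain ⟨-, ha0, ha7⟩ := idx_char a ha
  obtain ⟨-, hb0, hb7⟩ := idx_char b hb
  obtain ⟨-, hc0, hc7⟩ := idx_char c hc
  by_cases hv : 1 ≤ 49 * idx a + 7 * idx b + idx c ∧ 49 * idx a + 7 * idx b + idx c ≤ 254
  · rw [decide_eq_true hv]
    exact (contains_iff _).mpr ⟨_, ⟨hv.1, by omega⟩, mkId_val a b c ha hb hc⟩
  · rw [decide_eq_false hv]
    cases hco : PySem.Set.contains allValidIds (String.ofList [a, b, c]) with
    | false => rfl
    | true =>
      exfalso
      obtain ⟨n, ⟨h1, h2⟩, heq⟩ := (contains_iff _).mp hco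
      have := mkId_inj n (49 * idx a + 7 * idx b + idx c) (by omega) (by omega) (by omega)
        (by omega) (heq.trans (mkId_val a b c ha hb hc).symm)
      omega

lemma body_valid (a b c : Char) (ha : a ∈ VALID_ID_COLORS) (hb : b ∈ VALID_ID_COLORS)
    (hc : c ∈ VALID_ID_COLORS) :
    cid_body [a, b, c] =
      decide (1 ≤ 49 * idx a + 7 * idx b + idx c ∧ 49 * idx a + 7 * idx b + idx c ≤ 254) := by
  have hrev : (PySem.List.slice? [a, b, c] none none (-1)).getD [] = [c, b, a] := by
    simp [pysem]
  unfold cid_body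
  rw [if_neg (by simp [ha, hb, hc]), hrev]
  have hnum : (PySem.List.enumerate [c, b, a]).foldl
      (fun num p =>
        num + (VALID_ID_COLORS.length : Int) ^ p.1.toNat *
          (((PySem.List.index? VALID_ID_COLORS p.2).getD 0 : Nat) : Int)) 0
      = 49 * idx a + 7 * idx b + idx c := by
    show (0 + 7 ^ (0:Int).toNat * idx c + 7 ^ (1:Int).toNat * idx b + 7 ^ (2:Int).toNat * idx a)
        = 49 * idx a + 7 * idx b + idx c
    simp only [show ((0:Int)).toNat = 0 from rfl, show ((1:Int)).toNat = 1 from rfl,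
      show ((2:Int)).toNat = 2 from rfl]
    ring
  simp only [hnum]
  by_cases h : 1 ≤ 49 * idx a + 7 * idx b + idx c ∧ 49 * idx a + 7 * idx b + idx c ≤ 254
  · rw [if_neg (by omega), decide_eq_true h]
  · rw [if_pos (by omega), decide_eq_false h]

lemma body_bad (a b c : Char) (h : ¬(a ∈ VALID_ID_COLORS ∧ b ∈ VALID_ID_COLORS ∧ c ∈ VALID_ID_COLORS)) :
    cid_body [a, b, c] = false := by
  unfold cid_body
  rw [if_pos]
  simp only [List.any_cons, List.any_nil, Bool.or_false, Bool.or_eq_true, Bool.not_eq_true',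
    Bool.eq_false_iff, Ne, List.contains_iff_mem]
  tauto

lemma contains_bad (a b c : Char)
    (h : ¬(a ∈ VALID_ID_COLORS ∧ b ∈ VALID_ID_COLORS ∧ c ∈ VALID_ID_COLORS)) :
    PySem.Set.contains allValidIds (String.ofList [a, b, c]) = false := by
  cases hco : PySem.Set.contains allValidIds (String.ofList [a, b, c]) with
  | false => rfl
  | true =>
    exfalso
    obtain ⟨n, -, heq⟩ := (contains_iff _).mp hco
    have h' := congrArg String.toList heq
    simp only [mkId, String.toList_ofList, List.cons.injEq, and_true] at h'
    obtain ⟨h1, h2, h3⟩ := h'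
    exact h ⟨h1 ▸ getD_mem _, h2 ▸ getD_mem _, h3 ▸ getD_mem _⟩

lemma contains_len3 (x : String) (h : PySem.Set.contains allValidIds x = true) :
    x.toList.length = 3 := by
  obtain ⟨n, -, heq⟩ := (contains_iff x).mp h
  rw [← heq]
  simp [mkId]

-- ===== VERDICT (by name: the statement is the Claim_ definition above) =====
theorem cid_is_valid_spec : Claim_equal_cid_is_valid := by
  intro s _
  unfold Spec_cid_is_valid cid_is_valid cid_is_valid_alt
  have hulen : (PySem.Str.upper s).toList.length = s.toList.length := by
    simp [PySem.Str.toList_upper, PySem.Chars.upper]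
  by_cases h3 : PySem.Str.len s ≠ 3
  · rw [if_pos h3]
    have hlen : (PySem.Str.upper s).toList.length ≠ 3 := by
      rw [hulen]
      intro hl
      exact h3 (by rw [PySem.Str.len_eq, hl]; rfl)
    cases hco : PySem.Set.contains allValidIds (PySem.Str.upper s) with
    | false => rfl
    | true => exact absurd (contains_len3 _ hco) hlen
  · rw [if_neg h3]
    have hlen : (PySem.Str.upper s).toList.length = 3 := by
      rw [hulen]
      have h3' : PySem.Str.len s = 3 := not_not.mp h3
      rw [PySem.Str.len_eq] at h3'
      exact_mod_cast h3'
    obtain ⟨a, b, c, habc⟩ := List.length_eq_three.mp hlen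
    have hstr : PySem.Str.upper s = String.ofList [a, b, c] :=
      String.toList_inj.mp (by rw [habc, String.toList_ofList])
    rw [habc, hstr]
    by_cases hmem : a ∈ VALID_ID_COLORS ∧ b ∈ VALID_ID_COLORS ∧ c ∈ VALID_ID_COLORS
    · obtain ⟨ha, hb, hc⟩ := hmem
      rw [body_valid a b c ha hb hc, core_valid a b c ha hb hc]
    · rw [body_bad a b c hmem, contains_bad a b c hmem]
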